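-- pv_equiv track=rewrite | github.com/chiraggarg24/Integer_State_Optimization_Framework | src/graph_coloring_mapping_util.py | check_double_count_edge
-- ===== SOURCE A (Python) =====
-- def check_double_count_edge(edges):
--     edges_set = set(map(tuple, edges))
--     # Initialize a set to keep track of seen edges
--     seen_edges = set()
--     # Initialize a list to collect duplicate edges
--     duplicate_edges = []
--
--     # Check each edge in the set
--     for edge in edges_set:
--         v, u = edge
--         # Check if the reverse edge (u, v) is already seen
--         if (u, v) in seen_edges:
--             duplicate_edges.append((v, u))
--             return True
--         else:
--             seen_edges.add(edge)
--     return False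
-- ===== SOURCE B (Python) =====
-- def check_double_count_edge(edges):
--     distinct = set(map(tuple, edges))
--     nonloops = [(a, b) for (a, b) in distinct if a != b]
--     canon = {(min(a, b), max(a, b)) for (a, b) in nonloops}
--     return len(canon) < len(nonloops)
-- ===== Notes on version B (the rewrite author's own statement) =====
-- stated objective: alternative
-- what changed: Replaces A's streaming seen-set with reverse-membership tests by a counting argument: canonicalize each distinct non-self-loop edge to (min,max) and return whether canonicalization collapses the count, i.e. len(canonical set) < number of distinct non-loop edges; no reverse edge is ever looked up.
import Mathlib
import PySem

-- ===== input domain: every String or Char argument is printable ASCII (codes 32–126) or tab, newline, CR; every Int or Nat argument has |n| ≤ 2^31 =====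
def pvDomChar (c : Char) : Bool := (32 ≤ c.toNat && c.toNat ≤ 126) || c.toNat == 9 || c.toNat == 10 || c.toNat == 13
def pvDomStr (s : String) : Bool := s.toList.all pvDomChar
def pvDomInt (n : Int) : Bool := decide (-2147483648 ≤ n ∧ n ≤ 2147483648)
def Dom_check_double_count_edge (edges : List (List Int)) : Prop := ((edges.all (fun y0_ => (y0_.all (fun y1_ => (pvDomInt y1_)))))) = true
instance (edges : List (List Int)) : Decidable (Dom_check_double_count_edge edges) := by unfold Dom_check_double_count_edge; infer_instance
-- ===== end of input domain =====

-- B replaces A's streaming seen-set loop (reverse-membership test, early return) by a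
-- counting argument: canonicalize each distinct non-self-loop edge to (min, max) and
-- compare cardinalities; no reverse edge is ever looked up. Return-value equivalence only.

-- ===== PORT A =====
-- the 'for edge in edges_set' loop; the '| _' branch is Python's ValueError on unpacking
-- a non-pair edge (excluded by Pre_); result is iteration-order independent (proved below).
def pvLoopA : List (List Int) → PySem.Set (List Int) → Bool
  | [], _ => false
  | e :: rest, seen =>
    match e with
    | [v, u] =>
      if PySem.Set.contains seen [u, v] then true
      else pvLoopA rest (PySem.Set.add seen e)
    | _ => false

def check_double_count_edge (edges : List (List Int)) : Bool :=
  let edges_set : PySem.Set (List Int) := PySem.Set.ofList edges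
  pvLoopA edges_set PySem.Set.empty

-- ===== PORT B =====
-- the '[(a, b) for (a, b) in distinct if a != b]' comprehension; '| _' is Python's
-- ValueError on unpacking a non-pair edge (outside Pre_)
def pvNonloopsB (distinct : PySem.Set (List Int)) : List (Int × Int) :=
  distinct.filterMap fun e =>
    match e with
    | [a, b] => if a ≠ b then some (a, b) else none
    | _ => none

def check_double_count_edge_alt (edges : List (List Int)) : Bool :=
  let distinct : PySem.Set (List Int) := PySem.Set.ofList edges
  let nonloops := pvNonloopsB distinct
  let canon : PySem.Set (Int × Int) :=
    PySem.Set.ofList (nonloops.map fun p => (min p.1 p.2, max p.1 p.2))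
  decide (canon.length < nonloops.length)

-- ===== PRECONDITION & SPEC =====
-- Pre_ excludes edges that are not pairs: on those Python A (and B) raise ValueError when unpacking.
def Pre_check_double_count_edge (edges : List (List Int)) : Prop :=
  ∀ e ∈ edges, e.length = 2
instance (edges : List (List Int)) : Decidable (Pre_check_double_count_edge edges) := by
  unfold Pre_check_double_count_edge; infer_instance
def pvWitness_check_double_count_edge : List (List Int) := [[1, 2], [2, 1], [3, 3]]
def Spec_check_double_count_edge (edges : List (List Int)) (out : Bool) : Prop := out = check_double_count_edge_alt edges
instance (edges : List (List Int)) (out : Bool) : Decidable (Spec_check_double_count_edge edges out) := by unfold Spec_check_double_count_edge; infer_instance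

-- ===== CLAIM (what is proved, stated in full; the proofs are below) =====
def Claim_equal_check_double_count_edge : Prop := ∀ (edges : List (List Int)), Dom_check_double_count_edge edges → Pre_check_double_count_edge edges → Spec_check_double_count_edge edges (check_double_count_edge edges)

-- ===== LEMMAS AND PROOFS =====

-- characterisation of A's loop: with all elements pairs and the scanned list nodup,
-- it finds a pair whose reverse is in 'seen' or both orientations of a non-self-loop in the list
theorem pvLoopA_iff (l : List (List Int)) (seen : PySem.Set (List Int))
    (hlen : ∀ e ∈ l, e.length = 2) (hnd : l.Nodup) :
    pvLoopA l seen = true ↔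
      ∃ a b : Int, [a, b] ∈ l ∧ ([b, a] ∈ seen ∨ ([b, a] ∈ l ∧ a ≠ b)) := by
  induction l generalizing seen with
  | nil => simp [pvLoopA]
  | cons e rest ih =>
    obtain ⟨v, u, rfl⟩ : ∃ v u : Int, e = [v, u] := by
      have h2 := hlen e (List.mem_cons_self ..)
      match e, h2 with
      | [v, u], _ => exact ⟨v, u, rfl⟩
    have hnd' := hnd
    rw [List.nodup_cons] at hnd'
    by_cases hs : PySem.Set.contains seen [u, v] = true
    · simp only [pvLoopA, hs, if_true, true_iff]
      rw [PySem.Set.contains_iff] at hs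
      exact ⟨v, u, List.mem_cons_self .., Or.inl hs⟩
    · simp only [pvLoopA, hs]
      rw [if_neg Bool.false_ne_true]
      rw [ih (PySem.Set.add seen [v, u]) (fun x hx => hlen x (List.mem_cons_of_mem _ hx)) hnd'.2]
      have hsmem : [u, v] ∉ seen := by
        rw [← PySem.Set.contains_iff]; simpa using hs
      constructor
      · rintro ⟨a, b, hab, hrest⟩
        refine ⟨a, b, List.mem_cons_of_mem _ hab, ?_⟩
        rcases hrest with hseen | ⟨hba, hne⟩
        · rw [PySem.Set.mem_add] at hseen
          rcases hseen with hseen | heq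
          · exact Or.inl hseen
          · have hb : b = v := by injection heq
            have ha : a = u := by
              injection heq with _ t; injection t
            subst hb; subst ha
            refine Or.inr ⟨List.mem_cons_self .., ?_⟩
            intro h; subst h
            exact hnd'.1 hab
        · exact Or.inr ⟨List.mem_cons_of_mem _ hba, hne⟩
      · rintro ⟨a, b, hab, hrest⟩
        rcases List.mem_cons.mp hab with hab0 | habr
        · have ha : a = v := by injection hab0
          have hb : b = u := by
            injection hab0 with _ t; injection t
          subst ha; subst hb
          rcases hrest with hseen | ⟨hba, hne⟩
          · exact absurd hseen hsmem
          · rcases List.mem_cons.mp hba with hba0 | hbar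
            · exact absurd (by injection hba0 with h1 _; exact h1.symm) hne
            · refine ⟨b, a, hbar, Or.inl ?_⟩
              rw [PySem.Set.mem_add]; exact Or.inr rfl
        · rcases hrest with hseen | ⟨hba, hne⟩
          · refine ⟨a, b, habr, Or.inl ?_⟩
            rw [PySem.Set.mem_add]; exact Or.inl hseen
          · rcases List.mem_cons.mp hba with hba0 | hbar
            · refine ⟨a, b, habr, Or.inl ?_⟩
              rw [PySem.Set.mem_add, hba0]; exact Or.inr rfl
            · exact ⟨a, b, habr, Or.inr ⟨hbar, hne⟩⟩

theorem pvMem_nonloopsB (s : PySem.Set (List Int)) (a b : Int) :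
    (a, b) ∈ pvNonloopsB s ↔ [a, b] ∈ s ∧ a ≠ b := by
  unfold pvNonloopsB
  rw [List.mem_filterMap]
  constructor
  · rintro ⟨x, hx, hfx⟩
    match x, hfx with
    | [c, d], hfx =>
      by_cases hne : c = d
      · simp [hne] at hfx
      · simp only [hne, ne_eq, not_false_eq_true, if_true, Option.some.injEq] at hfx
        obtain ⟨rfl, rfl⟩ := Prod.mk.injEq .. ▸ hfx
        exact ⟨hx, hne⟩
  · rintro ⟨hab, hne⟩
    exact ⟨[a, b], hab, by simp [hne]⟩

theorem pvNodup_nonloopsB (s : PySem.Set (List Int)) (hs : s.Nodup) :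
    (pvNonloopsB s).Nodup := by
  refine List.Nodup.filterMap ?_ hs
  intro x y p hx hy
  match x, y, hx, hy with
  | [a, b], [c, d], hx, hy =>
    by_cases h1 : a = b
    · simp [h1] at hx
    · by_cases h2 : c = d
      · simp [h2] at hy
      · simp only [h1, h2, ne_eq, not_false_eq_true, if_true, Option.mem_def,
          Option.some.injEq] at hx hy
        subst hx
        obtain ⟨rfl, rfl⟩ := Prod.mk.injEq .. ▸ hy.symm
        rfl

-- dedup strictly shrinks a list with a repetition
theorem pvOfList_length_lt {α : Type} [BEq α] [LawfulBEq α] (ys : List α) (h : ¬ ys.Nodup) :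
    (PySem.Set.ofList ys).length < ys.length := by
  induction ys with
  | nil => exact absurd List.nodup_nil h
  | cons y t ih =>
    rw [PySem.Set.ofList_cons]
    simp only [List.length_cons]
    by_cases hy : y ∈ t
    · have hmem : y ∈ PySem.Set.ofList t := (PySem.Set.mem_ofList ..).mpr hy
      have hsub : (PySem.Set.discard (PySem.Set.ofList t) y).Sublist (PySem.Set.ofList t) :=
        List.filter_sublist
      have hlt : (PySem.Set.discard (PySem.Set.ofList t) y).length < (PySem.Set.ofList t).length := by
        rcases Nat.lt_or_ge (PySem.Set.discard (PySem.Set.ofList t) y).length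
          (PySem.Set.ofList t).length with h' | h'
        · exact h'
        · exfalso
          have heq := hsub.eq_of_length (Nat.le_antisymm hsub.length_le h')
          have : y ∈ PySem.Set.discard (PySem.Set.ofList t) y := heq.symm ▸ hmem
          rw [PySem.Set.mem_discard] at this
          exact this.2 rfl
      have hle : (PySem.Set.ofList t).length ≤ t.length := PySem.Set.length_ofList_le t
      omega
    · have hne : ¬ t.Nodup := by
        intro hnd
        exact h (List.nodup_cons.mpr ⟨hy, hnd⟩)
      have heq : PySem.Set.discard (PySem.Set.ofList t) y = PySem.Set.ofList t := by
        unfold PySem.Set.discard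
        refine List.filter_eq_self.mpr ?_
        intro x hx
        have hxt : x ∈ t := (PySem.Set.mem_ofList ..).mp hx
        simp only [Bool.not_eq_eq_eq_not, Bool.not_true, beq_eq_false_iff_ne, ne_eq]
        intro hxy; subst hxy; exact hy hxt
      rw [heq]
      exact Nat.succ_lt_succ (ih hne)

-- B's cardinality test fires iff the canonical map is non-injective on nonloops
theorem pvB_lt_iff {α β : Type} [BEq β] [LawfulBEq β] (l : List α) (f : α → β) :
    (PySem.Set.ofList (l.map f)).length < l.length ↔ ¬ (l.map f).Nodup := by
  rw [← List.length_map (f := f) (as := l)]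
  constructor
  · intro hlt hnd
    rw [PySem.Set.ofList_eq_self_of_nodup _ hnd] at hlt
    omega
  · exact pvOfList_length_lt _

-- ===== VERDICT (by name: the statement is the Claim_ definition above) =====
theorem check_double_count_edge_spec : Claim_equal_check_double_count_edge := by
  intro edges _ hpre
  unfold Spec_check_double_count_edge check_double_count_edge check_double_count_edge_alt
  set s := PySem.Set.ofList edges with hs
  have hnd : s.Nodup := PySem.Set.nodup_ofList edges
  have hlen : ∀ e ∈ s, e.length = 2 := by
    intro e he
    exact hpre e ((PySem.Set.mem_ofList ..).mp he)
  have hA := pvLoopA_iff s PySem.Set.empty hlen hnd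
  have hnl := pvNodup_nonloopsB s hnd
  rw [Bool.eq_iff_iff, hA, decide_eq_true_eq,
    pvB_lt_iff (pvNonloopsB s) (fun p => (min p.1 p.2, max p.1 p.2))]
  constructor
  · rintro ⟨a, b, hab, hrest⟩
    rcases hrest with hseen | ⟨hba, hne⟩
    · exact absurd hseen (by simp [PySem.Set.empty])
    · intro hmapnd
      have hinj := List.inj_on_of_nodup_map hmapnd
      have h1 : (a, b) ∈ pvNonloopsB s := (pvMem_nonloopsB s a b).mpr ⟨hab, hne⟩
      have h2 : (b, a) ∈ pvNonloopsB s := (pvMem_nonloopsB s b a).mpr ⟨hba, fun h => hne h.symm⟩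
      have : (a, b) = (b, a) := hinj h1 h2 (by simp [min_comm, max_comm])
      exact hne (Prod.ext_iff.mp this).1
  · intro hnmap
    by_contra hno
    apply hnmap
    have hno' : ∀ x y : Int, [x, y] ∈ s → [y, x] ∈ s → x = y := by
      intro x y hxy hyx
      by_contra hxyne
      exact hno ⟨x, y, hxy, Or.inr ⟨hyx, hxyne⟩⟩
    refine List.Nodup.map_on ?_ hnl
    rintro ⟨a, b⟩ hx ⟨c, d⟩ hy hfeq
    obtain ⟨hab, hne1⟩ := (pvMem_nonloopsB s a b).mp hx
    obtain ⟨hcd, hne2⟩ := (pvMem_nonloopsB s c d).mp hy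
    simp only [Prod.mk.injEq] at hfeq
    obtain ⟨hm1, hm2⟩ := hfeq
    have hcases : (a = c ∧ b = d) ∨ (a = d ∧ b = c) := by omega
    rcases hcases with ⟨rfl, rfl⟩ | ⟨rfl, rfl⟩
    · rfl
    · exact absurd (hno' a b hab hcd) hne1
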